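-- pv_equiv track=rewrite | github.com/philippmao/pastebin_scraper | frontend/utils.py | slider
-- ===== SOURCE A (Python) =====
-- def slider(mn, mx, max_r):
--   while mn < 0:
--     mn += 1
--     if mx < max_r:
--       mx +=1
--   while mx > max_r:
--     mx -= 1
--     if mn > 0:
--       mn -= 1
--   return mn, mx
-- ===== SOURCE B (Python) =====
-- def slider(mn, mx, max_r):
--     up = max(-mn, 0)
--     mx1 = mx + max(0, min(up, max_r - mx))
--     down = max(mx1 - max_r, 0)
--     return max(max(mn, 0) - down, 0), mx1 - down
-- ===== Notes on version B (the rewrite author's own statement) =====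
-- stated objective: faster
-- what changed: Replaced the two unit-step while loops (step mn toward 0 coupled with mx, then step mx down toward max_r coupled with mn) with a single closed-form arithmetic clamp using max/min; intended as faster (O(1) vs loop proportional to |mn|+|mx-max_r|), measured 25.22x at the largest size though inconsistent on inputs whose loops are short.
import Mathlib
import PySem

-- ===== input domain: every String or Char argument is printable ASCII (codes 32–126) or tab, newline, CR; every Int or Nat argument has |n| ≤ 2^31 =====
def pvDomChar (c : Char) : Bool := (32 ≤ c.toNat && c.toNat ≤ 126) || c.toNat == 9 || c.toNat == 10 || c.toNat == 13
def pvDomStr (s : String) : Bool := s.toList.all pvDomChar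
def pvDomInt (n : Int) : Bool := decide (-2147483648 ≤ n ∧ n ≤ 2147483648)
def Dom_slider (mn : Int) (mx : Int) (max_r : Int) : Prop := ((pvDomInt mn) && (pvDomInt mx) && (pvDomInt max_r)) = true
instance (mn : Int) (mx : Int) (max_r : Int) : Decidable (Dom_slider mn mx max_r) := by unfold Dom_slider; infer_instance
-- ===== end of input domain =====

-- B replaces A's two unit-step while loops by a closed-form arithmetic clamp (intended as faster; timing run read 25x at the largest size, inconsistent on short-loop inputs).
-- ===== PORT A =====
def sliderLoop1 (mn : Int) (mx : Int) (max_r : Int) : Int × Int :=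
  if mn < 0 then
    sliderLoop1 (mn + 1) (if mx < max_r then mx + 1 else mx) max_r
  else (mn, mx)
termination_by (-mn).toNat
decreasing_by omega

def sliderLoop2 (mn : Int) (mx : Int) (max_r : Int) : Int × Int :=
  if mx > max_r then
    sliderLoop2 (if mn > 0 then mn - 1 else mn) (mx - 1) max_r
  else (mn, mx)
termination_by (mx - max_r).toNat
decreasing_by omega

def slider (mn : Int) (mx : Int) (max_r : Int) : Int × Int :=
  let p := sliderLoop1 mn mx max_r
  sliderLoop2 p.1 p.2 max_r

-- ===== PORT B =====
def slider_alt (mn : Int) (mx : Int) (max_r : Int) : Int × Int :=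
  let up := max (-mn) 0
  let mx1 := mx + max 0 (min up (max_r - mx))
  let down := max (mx1 - max_r) 0
  (max (max mn 0 - down) 0, mx1 - down)

-- ===== PRECONDITION & SPEC =====
def Spec_slider (mn : Int) (mx : Int) (max_r : Int) (out : Int × Int) : Prop := out = slider_alt mn mx max_r
instance (mn : Int) (mx : Int) (max_r : Int) (out : Int × Int) : Decidable (Spec_slider mn mx max_r out) := by unfold Spec_slider; infer_instance

-- ===== CLAIM (what is proved, stated in full; the proofs are below) =====
def Claim_equal_slider : Prop := ∀ (mn : Int) (mx : Int) (max_r : Int), Dom_slider mn mx max_r → Spec_slider mn mx max_r (slider mn mx max_r)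

-- ===== LEMMAS AND PROOFS =====
theorem sliderLoop1_eq (mn mx max_r : Int) :
    sliderLoop1 mn mx max_r = (max mn 0, mx + max 0 (min (max (-mn) 0) (max_r - mx))) := by
  fun_induction sliderLoop1 mn mx max_r with
  | case1 mn mx h ih =>
      simp only [dite_eq_ite] at ih
      rw [ih]
      simp only [Prod.mk.injEq]
      split_ifs at * <;> constructor <;> omega
  | case2 mn mx h =>
      simp only [Prod.mk.injEq]
      constructor <;> omega

theorem sliderLoop2_eq (mn mx max_r : Int) (hmn : 0 ≤ mn) :
    sliderLoop2 mn mx max_r = (max (mn - max (mx - max_r) 0) 0, mx - max (mx - max_r) 0) := by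
  fun_induction sliderLoop2 mn mx max_r with
  | case1 mn mx h ih =>
      simp only [dite_eq_ite] at ih
      rw [ih (by split_ifs <;> omega)]
      simp only [Prod.mk.injEq]
      split_ifs at * <;> constructor <;> omega
  | case2 mn mx h =>
      simp only [Prod.mk.injEq]
      constructor <;> omega

-- ===== VERDICT (by name: the statement is the Claim_ definition above) =====
theorem slider_spec : Claim_equal_slider := by
  intro mn mx max_r _
  show _ = _
  simp only [slider, sliderLoop1_eq, sliderLoop2_eq _ _ _ (le_max_right mn 0), slider_alt]
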